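-- pv_equiv track=rewrite | github.com/xlf0708/MultiLabelClassification-master | xiao/SCMJ/lib_MJ.py | split_type_s
-- ===== SOURCE A (Python) =====
-- def split_type_s(cards=[]):
--     """
--     功能：手牌花色分离，将手牌分离成万条筒字各色后输出
--     :param cards: 手牌　[]
--     :return: 万,条,筒,字　[],[],[],[]
--     """
--     cards_wan = []
--     cards_tiao = []
--     cards_tong = []
--     for card in cards:
--         if card & 0xF0 == 0x00:
--             cards_wan.append(card)
--         elif card & 0xF0 == 0x10:
--             cards_tiao.append(card)
--         elif card & 0xF0 == 0x20:
--             cards_tong.append(card)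
--     return cards_wan, cards_tiao, cards_tong
-- ===== SOURCE B (Python) =====
-- def split_type_s(cards=[]):
--     cards_wan = [c for c in cards if c & 0xF0 == 0x00]
--     cards_tiao = [c for c in cards if c & 0xF0 == 0x10]
--     cards_tong = [c for c in cards if c & 0xF0 == 0x20]
--     return cards_wan, cards_tiao, cards_tong
-- ===== Notes on version B (the rewrite author's own statement) =====
-- stated objective: idiomatic
-- what changed: Replaces the single branching partition loop with three independent filter comprehensions, one per suit mask.
import Mathlib
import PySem

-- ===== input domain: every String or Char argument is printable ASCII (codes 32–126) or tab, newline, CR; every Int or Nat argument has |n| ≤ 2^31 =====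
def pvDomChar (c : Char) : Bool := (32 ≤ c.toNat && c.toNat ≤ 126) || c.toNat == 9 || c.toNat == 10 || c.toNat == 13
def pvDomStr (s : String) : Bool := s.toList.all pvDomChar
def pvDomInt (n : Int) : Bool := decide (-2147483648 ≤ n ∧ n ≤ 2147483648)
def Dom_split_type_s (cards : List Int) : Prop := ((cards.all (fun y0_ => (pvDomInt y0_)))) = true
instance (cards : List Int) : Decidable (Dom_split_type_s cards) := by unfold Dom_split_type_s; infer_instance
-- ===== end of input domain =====

-- ===== PORT A =====
-- literal transliteration of A: one pass with three accumulators, appends in branch order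
def split_type_s (cards : List Int) : List Int × List Int × List Int :=
  cards.foldl (fun (acc : List Int × List Int × List Int) card =>
    if PySem.Int.band card 0xF0 = 0x00 then (acc.1 ++ [card], acc.2.1, acc.2.2)
    else if PySem.Int.band card 0xF0 = 0x10 then (acc.1, acc.2.1 ++ [card], acc.2.2)
    else if PySem.Int.band card 0xF0 = 0x20 then (acc.1, acc.2.1, acc.2.2 ++ [card])
    else acc) ([], [], [])

-- ===== PORT B =====
-- B: three independent filters, one per suit mask
def split_type_s_alt (cards : List Int) : List Int × List Int × List Int :=
  (cards.filter (fun c => PySem.Int.band c 0xF0 = 0x00),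
   cards.filter (fun c => PySem.Int.band c 0xF0 = 0x10),
   cards.filter (fun c => PySem.Int.band c 0xF0 = 0x20))

-- ===== PRECONDITION & SPEC =====
def Spec_split_type_s (cards : List Int) (out : List Int × List Int × List Int) : Prop := out = split_type_s_alt cards
instance (cards : List Int) (out : List Int × List Int × List Int) : Decidable (Spec_split_type_s cards out) := by unfold Spec_split_type_s; infer_instance

-- ===== CLAIM (what is proved, stated in full; the proofs are below) =====
def Claim_equal_split_type_s : Prop := ∀ (cards : List Int), Dom_split_type_s cards → Spec_split_type_s cards (split_type_s cards)

-- ===== LEMMAS AND PROOFS =====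

-- ===== VERDICT (by name: the statement is the Claim_ definition above) =====
lemma split_fold (cards : List Int) (w t g : List Int) :
    cards.foldl (fun (acc : List Int × List Int × List Int) card =>
      if PySem.Int.band card 0xF0 = 0x00 then (acc.1 ++ [card], acc.2.1, acc.2.2)
      else if PySem.Int.band card 0xF0 = 0x10 then (acc.1, acc.2.1 ++ [card], acc.2.2)
      else if PySem.Int.band card 0xF0 = 0x20 then (acc.1, acc.2.1, acc.2.2 ++ [card])
      else acc) (w, t, g)
    = (w ++ cards.filter (fun c => PySem.Int.band c 0xF0 = 0x00),
       t ++ cards.filter (fun c => PySem.Int.band c 0xF0 = 0x10),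
       g ++ cards.filter (fun c => PySem.Int.band c 0xF0 = 0x20)) := by
  induction cards generalizing w t g with
  | nil => simp
  | cons c cs ih =>
    simp only [List.foldl_cons, List.filter_cons]
    split_ifs with h0 h1 h2 <;> simp_all

theorem split_type_s_spec : Claim_equal_split_type_s := by
  intro cards _
  unfold Spec_split_type_s split_type_s split_type_s_alt
  simpa using split_fold cards [] [] []
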